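-- pv_equiv track=rewrite | github.com/Redo0606/clearence | ontology_builder/pipeline/relation_inferer.py | _stratify_batches_by_component
-- ===== SOURCE A (Python) =====
-- def _stratify_batches_by_component(
--     entities: list[str],
--     node_to_component: dict[str, int],
--     batch_size: int,
--     num_components: int,
-- ) -> list[list[str]]:
--     """Build batches that mix entities from different components when possible."""
--     if num_components <= 1 or not node_to_component:
--         batches = []
--         for i in range(0, len(entities), batch_size):
--             batches.append(entities[i : i + batch_size])
--         return batches
--
--     # Group entities by component
--     by_comp: dict[int, list[str]] = {}
--     for e in entities:
--         c = node_to_component.get(e, 0)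
--         by_comp.setdefault(c, []).append(e)
--     comp_lists = list(by_comp.values())
--
--     # Round-robin interleave so each batch gets entities from multiple components
--     interleaved: list[str] = []
--     indices = [0] * len(comp_lists)
--     while True:
--         added = 0
--         for i, comp_entities in enumerate(comp_lists):
--             if indices[i] < len(comp_entities):
--                 interleaved.append(comp_entities[indices[i]])
--                 indices[i] += 1
--                 added += 1
--         if added == 0:
--             break
--
--     batches = []
--     for i in range(0, len(interleaved), batch_size):
--         batches.append(interleaved[i : i + batch_size])
--     return batches
-- ===== SOURCE B (Python) =====
-- def _stratify_batches_by_component(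
--     entities: list[str],
--     node_to_component: dict[str, int],
--     batch_size: int,
--     num_components: int,
-- ) -> list[list[str]]:
--     """Build batches that mix entities from different components when possible."""
--     if num_components <= 1 or not node_to_component:
--         interleaved = entities
--     else:
--         # Decorate-sort-undecorate: tag each entity with (rank within its
--         # component, first-seen index of its component) in one pass, then a
--         # single stable sort by that key yields exactly the round-robin order
--         # (rank = round number, component index = position within the round).
--         comp_order = {}  # component -> first-seen index
--         seen = {}        # component -> occurrences so far (= rank of next one)
--         keyed = []
--         for e in entities:
--             c = node_to_component.get(e, 0)
--             if c not in comp_order: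
--                 comp_order[c] = len(comp_order)
--             r = seen.get(c, 0)
--             seen[c] = r + 1
--             keyed.append((r, comp_order[c], e))
--         keyed.sort(key=lambda t: (t[0], t[1]))
--         interleaved = [t[2] for t in keyed]
--     return [interleaved[i:i + batch_size]
--             for i in range(0, len(interleaved), batch_size)]
-- ===== Notes on version B (the rewrite author's own statement) =====
-- stated objective: alternative
-- what changed: Replaces grouping into per-component lists plus a round-robin interleaving loop by decorate-sort-undecorate: one pass tags each entity with the key (rank within its component, first-seen index of its component), and a single stable sort by that key produces the interleaved order directly; no per-component lists and no interleave loop exist in B.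
import Mathlib
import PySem

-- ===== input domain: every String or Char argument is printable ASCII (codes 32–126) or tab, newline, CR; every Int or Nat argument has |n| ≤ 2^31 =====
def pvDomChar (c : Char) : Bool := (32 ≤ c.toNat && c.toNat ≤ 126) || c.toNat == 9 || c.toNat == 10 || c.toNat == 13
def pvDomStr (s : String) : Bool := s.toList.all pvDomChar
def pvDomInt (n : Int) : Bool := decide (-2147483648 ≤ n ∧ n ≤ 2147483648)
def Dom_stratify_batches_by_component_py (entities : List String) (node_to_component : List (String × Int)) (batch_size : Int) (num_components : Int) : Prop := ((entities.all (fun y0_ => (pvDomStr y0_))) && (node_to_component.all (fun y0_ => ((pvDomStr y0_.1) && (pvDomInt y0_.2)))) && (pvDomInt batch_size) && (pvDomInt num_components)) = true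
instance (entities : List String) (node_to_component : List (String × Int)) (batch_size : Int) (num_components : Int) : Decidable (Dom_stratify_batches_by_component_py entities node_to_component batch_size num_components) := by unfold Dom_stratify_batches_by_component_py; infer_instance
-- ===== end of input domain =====

-- B replaces A's group-then-round-robin interleaving by decorate-sort-undecorate: one pass
-- tags each entity with (rank within its component, first-seen index of its component) and a
-- single stable sort by that key yields the same interleaved order (objective: alternative).

-- ===== PORT A =====
-- 'for i in range(0, len(xs), batch_size): batches.append(xs[i:i+batch_size])'
def pvChunksA (xs : List String) (bs : Int) : List (List String) :=
  (PySem.List.pyRange 0 (xs.length : Int) bs).foldl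
    (fun acc i => acc ++ [PySem.List.slice xs (some i) (some (i + bs))]) []

-- one pass of A's 'while True' body over comp_lists with its indices:
-- returns (entities appended this round, new indices, added)
def pvARound : List (List String) → List Nat → List String × List Nat × Nat
  | [], _ => ([], [], 0)
  | _ :: _, [] => ([], [], 0)
  | l :: ls, i :: is =>
      let r := pvARound ls is
      if i < l.length then ((l.getD i "") :: r.1, (i + 1) :: r.2.1, r.2.2 + 1)
      else (r.1, i :: r.2.1, r.2.2)

def pvAMeasure : List (List String) → List Nat → Nat
  | [], _ => 0
  | _ :: _, [] => 0
  | l :: ls, i :: is => (l.length - i) + pvAMeasure ls is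

theorem pvARound_measure (ls : List (List String)) (is : List Nat) :
    pvAMeasure ls (pvARound ls is).2.1 + (pvARound ls is).2.2 = pvAMeasure ls is := by
  induction ls generalizing is with
  | nil => cases is <;> simp [pvARound, pvAMeasure]
  | cons l ls ih =>
    cases is with
    | nil => simp [pvARound, pvAMeasure]
    | cons i is =>
      have := ih is
      by_cases h : i < l.length <;>
        simp [pvARound, pvAMeasure, h] <;> omega

-- A's 'while True: … if added == 0: break' loop
def pvALoop (ls : List (List String)) (is : List Nat) : List String :=
  if (pvARound ls is).2.2 = 0 then []
  else (pvARound ls is).1 ++ pvALoop ls (pvARound ls is).2.1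
termination_by pvAMeasure ls is
decreasing_by
  have := pvARound_measure ls is
  omega

def stratify_batches_by_component_py (entities : List String) (node_to_component : List (String × Int)) (batch_size : Int) (num_components : Int) : List (List String) :=
  if num_components ≤ 1 ∨ node_to_component.isEmpty then
    pvChunksA entities batch_size
  else
    let nd := PySem.Dict.ofList node_to_component
    -- by_comp.setdefault(c, []).append(e)  =  by_comp[c] = by_comp.get(c, []) + [e]
    let by_comp := entities.foldl
      (fun d e => d.modify (nd.getD e 0) [] (fun l => l ++ [e])) PySem.Dict.empty
    let comp_lists := by_comp.values
    let interleaved := pvALoop comp_lists (List.replicate comp_lists.length 0)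
    pvChunksA interleaved batch_size

-- ===== PORT B =====
-- the body of B's decorating loop: state = (comp_order, seen, keyed)
def pvBStep (nd : PySem.Dict String Int)
    (st : PySem.Dict Int Int × PySem.Dict Int Int × List (Int × Int × String)) (e : String) :
    PySem.Dict Int Int × PySem.Dict Int Int × List (Int × Int × String) :=
  let c := nd.getD e 0
  let co := if st.1.contains c then st.1 else st.1.insert c (st.1.size : Int)
  let r := st.2.1.getD c 0
  (co, st.2.1.insert c (r + 1), st.2.2 ++ [(r, co.getD c 0, e)])

def stratify_batches_by_component_py_alt (entities : List String) (node_to_component : List (String × Int)) (batch_size : Int) (num_components : Int) : List (List String) :=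
  let interleaved :=
    if num_components ≤ 1 ∨ node_to_component.isEmpty then entities
    else
      let nd := PySem.Dict.ofList node_to_component
      let st := entities.foldl (pvBStep nd) (PySem.Dict.empty, PySem.Dict.empty, [])
      -- keyed.sort(key=lambda t: (t[0], t[1])): a stable sort by the lexicographic tuple key
      let keyed := PySem.List.sorted st.2.2 (fun t => toLex (t.1, t.2.1)) false
      keyed.map (fun t => t.2.2)
  (PySem.List.pyRange 0 (interleaved.length : Int) batch_size).map
    (fun i => PySem.List.slice interleaved (some i) (some (i + batch_size)))

-- ===== PRECONDITION & SPEC =====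
-- Pre_ excludes only batch_size = 0, on which Python's range(0, n, 0) raises ValueError in both A and B.
def Pre_stratify_batches_by_component_py (entities : List String) (node_to_component : List (String × Int)) (batch_size : Int) (num_components : Int) : Prop := batch_size ≠ 0
instance (entities : List String) (node_to_component : List (String × Int)) (batch_size : Int) (num_components : Int) : Decidable (Pre_stratify_batches_by_component_py entities node_to_component batch_size num_components) := by unfold Pre_stratify_batches_by_component_py; infer_instance
def pvWitness_stratify_batches_by_component_py : List String × (List (String × Int)) × Int × Int :=
  (["a", "b", "c", "d"], [("a", 1), ("b", 2), ("c", 1)], 2, 2)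

def Spec_stratify_batches_by_component_py (entities : List String) (node_to_component : List (String × Int)) (batch_size : Int) (num_components : Int) (out : List (List String)) : Prop := out = stratify_batches_by_component_py_alt entities node_to_component batch_size num_components
instance (entities : List String) (node_to_component : List (String × Int)) (batch_size : Int) (num_components : Int) (out : List (List String)) : Decidable (Spec_stratify_batches_by_component_py entities node_to_component batch_size num_components out) := by unfold Spec_stratify_batches_by_component_py; infer_instance

-- ===== CLAIM (what is proved, stated in full; the proofs are below) =====
def Claim_equal_stratify_batches_by_component_py : Prop := ∀ (entities : List String) (node_to_component : List (String × Int)) (batch_size : Int) (num_components : Int), Dom_stratify_batches_by_component_py entities node_to_component batch_size num_components → Pre_stratify_batches_by_component_py entities node_to_component batch_size num_components → Spec_stratify_batches_by_component_py entities node_to_component batch_size num_components (stratify_batches_by_component_py entities node_to_component batch_size num_components)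

-- ===== LEMMAS AND PROOFS =====

-- the sort key of a decorated entry
def pvKey (t : Int × Int × String) : Int ×ₗ Int := toLex (t.1, t.2.1)

-- decorated round-robin: ps = (component index, remaining suffix); r = current round
def pvDRm (ps : List (Int × List String)) : Nat := (ps.map (fun p => p.2.length)).sum

theorem pvDRm_le (ps : List (Int × List String)) :
    pvDRm (ps.map (fun p => (p.1, p.2.tail))) ≤ pvDRm ps := by
  induction ps with
  | nil => simp [pvDRm]
  | cons q qs ih =>
    simp only [pvDRm, List.map_cons, List.sum_cons] at *
    have : q.2.tail.length ≤ q.2.length := by cases q.2 <;> simp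
    omega

theorem pvDRm_lt (ps : List (Int × List String)) (h : ¬ ps.all (fun p => p.2.isEmpty)) :
    pvDRm (ps.map (fun p => (p.1, p.2.tail))) < pvDRm ps := by
  induction ps with
  | nil => simp at h
  | cons p ps ih =>
    obtain ⟨j, l⟩ := p
    by_cases hp : l.isEmpty
    · have h' : ¬ ps.all (fun p => p.2.isEmpty) := by simpa [hp] using h
      have := ih h'
      simp only [List.map_cons, pvDRm, List.sum_cons] at *
      have : l.tail.length ≤ l.length := by cases l <;> simp
      omega
    · have hlt : l.tail.length < l.length := by
        cases l with
        | nil => simp at hp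
        | cons a t => simp
      have hle := pvDRm_le ps
      simp only [pvDRm, List.map_cons, List.sum_cons] at *
      omega

def pvDR (r : Int) (ps : List (Int × List String)) : List (Int × Int × String) :=
  if h : ps.all (fun p => p.2.isEmpty) then []
  else ps.filterMap (fun p => p.2.head?.map (fun e => (r, p.1, e)))
       ++ pvDR (r + 1) (ps.map (fun p => (p.1, p.2.tail)))
termination_by pvDRm ps
decreasing_by rw [List.map_attach_eq_pmap]; simp; exact pvDRm_lt ps h

-- undecorated round-robin over suffixes
def pvU (ms : List (List String)) : List String :=
  if h : ms.all List.isEmpty then []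
  else ms.filterMap List.head? ++ pvU (ms.map List.tail)
termination_by (ms.map List.length).sum
decreasing_by
  have := pvDRm_lt (ms.map (fun l => ((0 : Int), l)))
      (by simpa [List.all_map, Function.comp] using h)
  simpa [pvDRm, List.map_map, Function.comp] using this

-- one column of the grid: entries of list l in component j, rounds r, r+1, …
def pvCol (r j : Int) : List String → List (Int × Int × String)
  | [] => []
  | e :: l => (r, j, e) :: pvCol (r + 1) j l

-- enumerate with Int indices (proof-side)
def pvEn {α : Type} : Int → List α → List (Int × α)
  | _, [] => []
  | i, x :: xs => (i, x) :: pvEn (i + 1) xs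

def pvG (d : PySem.Dict Int (List String)) : List (Int × Int × String) :=
  (pvEn 0 d.items).flatMap (fun p => pvCol 0 p.1 p.2.2)

-- ---- pvCol / pvEn basics ----
theorem pvCol_append (r j : Int) (l : List String) (e : String) :
    pvCol r j (l ++ [e]) = pvCol r j l ++ [(r + l.length, j, e)] := by
  induction l generalizing r with
  | nil => simp [pvCol]
  | cons a t ih =>
    simp only [List.cons_append, pvCol, ih, List.length_cons]
    push_cast
    rw [show r + 1 + (t.length : Int) = r + ((t.length : Int) + 1) from by ring]

theorem pvEn_append {α : Type} (i : Int) (xs ys : List α) :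
    pvEn i (xs ++ ys) = pvEn i xs ++ pvEn (i + xs.length) ys := by
  induction xs generalizing i with
  | nil => simp [pvEn]
  | cons x t ih =>
    simp only [List.cons_append, pvEn, ih, List.length_cons]
    push_cast
    rw [show i + 1 + (t.length : Int) = i + ((t.length : Int) + 1) from by ring]

theorem pvEn_map {α β : Type} (i : Int) (f : α → β) (xs : List α) :
    pvEn i (xs.map f) = (pvEn i xs).map (fun p => (p.1, f p.2)) := by
  induction xs generalizing i with
  | nil => simp [pvEn]
  | cons x t ih => simp [pvEn, ih]

theorem pvEn_map_snd {α : Type} (i : Int) (xs : List α) :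
    (pvEn i xs).map (fun p => p.2) = xs := by
  induction xs generalizing i with
  | nil => simp [pvEn]
  | cons x t ih => simp [pvEn, ih]

theorem pvEn_fst_ge {α : Type} (i : Int) (xs : List α) :
    ∀ x ∈ pvEn i xs, i ≤ x.1 := by
  induction xs generalizing i with
  | nil => simp [pvEn]
  | cons x t ih =>
    intro y hy
    simp only [pvEn, List.mem_cons] at hy
    rcases hy with rfl | hy
    · simp
    · have := ih (i + 1) y hy; omega

theorem pvEn_fst_pairwise {α : Type} (i : Int) (xs : List α) :
    (pvEn i xs).Pairwise (fun a b => a.1 < b.1) := by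
  induction xs generalizing i with
  | nil => simp [pvEn]
  | cons x t ih =>
    refine List.pairwise_cons.mpr ⟨?_, ih (i + 1)⟩
    intro y hy
    have := pvEn_fst_ge (i + 1) t y hy
    simp; omega

-- ---- pvU = pvDR stripped of its keys ----
theorem pvRow_map_thd (r : Int) (ps : List (Int × List String)) :
    (ps.filterMap (fun p => p.2.head?.map (fun e => (r, p.1, e)))).map (fun t => t.2.2)
      = (ps.map (fun p => p.2)).filterMap List.head? := by
  induction ps with
  | nil => simp
  | cons p t ih => cases hp : p.2 <;> simp [hp, ih]

theorem pvDR_map_thd (r : Int) (ps : List (Int × List String)) :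
    (pvDR r ps).map (fun t => t.2.2) = pvU (ps.map (fun p => p.2)) := by
  rw [pvDR, pvU]
  by_cases h : ps.all (fun p => p.2.isEmpty)
  · have h' : (ps.map (fun p => p.2)).all List.isEmpty := by
      simpa [List.all_map, Function.comp] using h
    rw [dif_pos h, dif_pos h']
    simp
  · have h' : ¬ (ps.map (fun p => p.2)).all List.isEmpty := by
      simpa [List.all_map, Function.comp] using h
    rw [dif_neg h, dif_neg h']
    have ih := pvDR_map_thd (r + 1) (ps.map (fun p => (p.1, p.2.tail)))
    rw [List.map_append, ih, pvRow_map_thd]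
    simp only [List.map_map, Function.comp_def]
termination_by pvDRm ps
decreasing_by exact pvDRm_lt ps h

-- ---- transpose: pvDR is a permutation of the column decomposition ----
theorem pvFlatMap_nil_of_all_empty (r : Int) (ps : List (Int × List String))
    (h : ps.all (fun p => p.2.isEmpty)) :
    ps.flatMap (fun p => pvCol r p.1 p.2) = [] := by
  induction ps with
  | nil => simp
  | cons p t ih =>
    simp only [List.all_cons, Bool.and_eq_true] at h
    have : p.2 = [] := by simpa [List.isEmpty_iff] using h.1
    simp [List.flatMap_cons, this, pvCol, ih h.2]

theorem pvPerm3 {α : Type} (a b c : List α) : (a ++ (b ++ c)).Perm (b ++ (a ++ c)) := by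
  have h1 : (a ++ (b ++ c)) = (a ++ b) ++ c := by simp [List.append_assoc]
  have h2 : (b ++ (a ++ c)) = (b ++ a) ++ c := by simp [List.append_assoc]
  rw [h1, h2]
  exact List.Perm.append_right _ List.perm_append_comm

theorem pvT_step (r : Int) (ps : List (Int × List String)) :
    (ps.flatMap (fun p => pvCol r p.1 p.2)).Perm
      (ps.filterMap (fun p => p.2.head?.map (fun e => (r, p.1, e)))
        ++ (ps.map (fun p => (p.1, p.2.tail))).flatMap (fun p => pvCol (r + 1) p.1 p.2)) := by
  induction ps with
  | nil => simp
  | cons p t ih =>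
    cases hp : p.2 with
    | nil => simpa [List.flatMap_cons, hp, pvCol] using ih
    | cons e l =>
      simp only [List.flatMap_cons, List.filterMap_cons, List.map_cons, hp, pvCol,
        Option.map_some, List.head?_cons, List.tail_cons, List.cons_append]
      refine List.Perm.trans (List.Perm.cons _ (List.Perm.append_left _ ih)) ?_
      exact List.Perm.cons _ (pvPerm3 _ _ _)

theorem pvDR_perm (r : Int) (ps : List (Int × List String)) :
    (pvDR r ps).Perm (ps.flatMap (fun p => pvCol r p.1 p.2)) := by
  rw [pvDR]
  by_cases h : ps.all (fun p => p.2.isEmpty)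
  · simp [h, pvFlatMap_nil_of_all_empty r ps h]
  · rw [dif_neg h]
    have ih := pvDR_perm (r + 1) (ps.map (fun p => (p.1, p.2.tail)))
    exact ((List.Perm.append_left _ ih).trans (pvT_step r ps).symm).symm.symm
termination_by pvDRm ps
decreasing_by exact pvDRm_lt ps h

-- ---- pvDR is strictly increasing in the key ----
theorem pvRow_facts (r : Int) (ps : List (Int × List String))
    (h : ps.Pairwise (fun a b => a.1 < b.1)) :
    (ps.filterMap (fun p => p.2.head?.map (fun e => (r, p.1, e)))).Pairwise
        (fun a b => a.2.1 < b.2.1)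
      ∧ ∀ x ∈ ps.filterMap (fun p => p.2.head?.map (fun e => (r, p.1, e))), x.1 = r := by
  induction ps with
  | nil => simp
  | cons p t ih =>
    obtain ⟨hp, ht⟩ := List.pairwise_cons.mp h
    obtain ⟨ih1, ih2⟩ := ih ht
    cases hq : p.2.head? with
    | none =>
      rw [List.filterMap_cons_none (by simp [hq])]
      exact ⟨ih1, ih2⟩
    | some e =>
      rw [show List.filterMap (fun q => q.2.head?.map (fun e => (r, q.1, e))) (p :: t)
            = (r, p.1, e) :: List.filterMap (fun q => q.2.head?.map (fun e => (r, q.1, e))) t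
          from List.filterMap_cons_some (by simp [hq])]
      constructor
      · refine List.pairwise_cons.mpr ⟨?_, ih1⟩
        intro y hy
        obtain ⟨q, hqmem, hqe⟩ := List.mem_filterMap.mp hy
        obtain ⟨e', _, rfl⟩ := Option.map_eq_some_iff.mp hqe
        simpa using hp q hqmem
      · intro x hx
        rcases List.mem_cons.mp hx with rfl | hx
        · rfl
        · exact ih2 x hx
  
theorem pvDR_ge (r : Int) (ps : List (Int × List String)) :
    ∀ x ∈ pvDR r ps, r ≤ x.1 := by
  rw [pvDR]
  by_cases h : ps.all (fun p => p.2.isEmpty)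
  · simp [h]
  · rw [dif_neg h]
    intro x hx
    rcases List.mem_append.mp hx with hx | hx
    · obtain ⟨q, _, hqe⟩ := List.mem_filterMap.mp hx
      obtain ⟨e', _, rfl⟩ := Option.map_eq_some_iff.mp hqe
      simp
    · have := pvDR_ge (r + 1) (ps.map (fun p => (p.1, p.2.tail))) x hx
      omega
termination_by pvDRm ps
decreasing_by exact pvDRm_lt ps h

theorem pvDR_pairwise (r : Int) (ps : List (Int × List String))
    (h : ps.Pairwise (fun a b => a.1 < b.1)) :
    (pvDR r ps).Pairwise (fun a b => pvKey a < pvKey b) := by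
  rw [pvDR]
  by_cases hall : ps.all (fun p => p.2.isEmpty)
  · simp [hall]
  · rw [dif_neg hall]
    obtain ⟨hrow, hr⟩ := pvRow_facts r ps h
    have ht : (ps.map (fun p => (p.1, p.2.tail))).Pairwise (fun a b => a.1 < b.1) := by
      refine List.Pairwise.map _ ?_ h
      intro a b hab
      simpa using hab
    refine List.pairwise_append.mpr ⟨?_, pvDR_pairwise (r + 1) _ ht, ?_⟩
    · refine hrow.imp_of_mem ?_
      intro a b ha hb hab
      have ha1 := hr a ha
      have hb1 := hr b hb
      simp [pvKey, Prod.Lex.toLex_lt_toLex, ha1, hb1, hab]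
    · intro a ha b hb
      have ha1 := hr a ha
      have hb1 := pvDR_ge (r + 1) _ b hb
      simp only [pvKey, Prod.Lex.toLex_lt_toLex]
      left; omega
termination_by pvDRm ps
decreasing_by exact pvDRm_lt ps hall

-- ---- A's round-robin loop computes pvU of the cursor suffixes ----
theorem pvARound_corr (ls : List (List String)) (is : List Nat) (hlen : is.length = ls.length) :
    (pvARound ls is).1 = (List.zipWith (fun l i => l.drop i) ls is).filterMap List.head?
    ∧ ((pvARound ls is).2.2 = 0 ↔ (List.zipWith (fun l i => l.drop i) ls is).all List.isEmpty)
    ∧ List.zipWith (fun l i => l.drop i) ls (pvARound ls is).2.1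
        = (List.zipWith (fun l i => l.drop i) ls is).map List.tail
    ∧ (pvARound ls is).2.1.length = is.length := by
  induction ls generalizing is with
  | nil => cases is with
    | nil => simp [pvARound]
    | cons i is => simp at hlen
  | cons l ls ih =>
    cases is with
    | nil => simp at hlen
    | cons i is =>
      obtain ⟨h1, h2, h3, h4⟩ := ih is (by simpa using hlen)
      by_cases h : i < l.length
      · have hd : (l.drop i).head? = some (l.getD i "") := by
          rw [List.head?_drop, List.getElem?_eq_getElem h, List.getD_eq_getElem _ _ h]
        have hne : (l.drop i).isEmpty = false := by
          rw [List.isEmpty_eq_false_iff]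
          intro hcon
          rw [hcon] at hd
          simp at hd
        simp only [pvARound, if_pos h, List.zipWith_cons_cons,
          List.filterMap_cons_some (f := List.head?) hd, List.all_cons, List.map_cons, hne]
        refine ⟨by simp [h1], by simp, ?_, by simpa using h4⟩
        simp [h3, List.tail_drop]
      · have hnil : l.drop i = [] := List.drop_eq_nil_of_le (by omega)
        simp only [pvARound, if_neg h, List.zipWith_cons_cons, hnil,
          List.filterMap_cons_none (f := List.head?) (l := List.zipWith (fun l i => l.drop i) ls is) (a := []) rfl,
          List.all_cons, List.map_cons]
        exact ⟨by simp [h1], by simp [h2], by simp [h3], by simpa using h4⟩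

theorem pvALoop_eq_U (ls : List (List String)) (is : List Nat) (hlen : is.length = ls.length) :
    pvALoop ls is = pvU (List.zipWith (fun l i => l.drop i) ls is) := by
  obtain ⟨h1, h2, h3, h4⟩ := pvARound_corr ls is hlen
  rw [pvALoop, pvU]
  by_cases h : (pvARound ls is).2.2 = 0
  · rw [if_pos h, dif_pos (h2.mp h)]
  · rw [if_neg h, dif_neg (fun hc => h (h2.mpr hc))]
    have := pvALoop_eq_U ls (pvARound ls is).2.1 (by omega)
    rw [h1, this, h3]
termination_by pvAMeasure ls is
decreasing_by
  have := pvARound_measure ls is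
  omega

theorem pvZipWith_drop_zero (ls : List (List String)) :
    List.zipWith (fun l i => l.drop i) ls (List.replicate ls.length 0) = ls := by
  induction ls with
  | nil => simp
  | cons l t ih => simp [List.replicate_succ, ih]

-- ---- the component-index table ----
def pvIdx : List Int → Int → List (Int × Int)
  | [], _ => []
  | c :: cs, i => (c, i) :: pvIdx cs (i + 1)

theorem pvIdx_append (ks ms : List Int) (i : Int) :
    pvIdx (ks ++ ms) i = pvIdx ks i ++ pvIdx ms (i + ks.length) := by
  induction ks generalizing i with
  | nil => simp [pvIdx]
  | cons c t ih =>
    simp only [List.cons_append, pvIdx, ih, List.length_cons]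
    push_cast
    rw [show i + 1 + (t.length : Int) = i + ((t.length : Int) + 1) from by ring]

theorem pvIdx_map_fst (ks : List Int) (i : Int) : (pvIdx ks i).map (fun p => p.1) = ks := by
  induction ks generalizing i with
  | nil => simp [pvIdx]
  | cons c t ih => simp [pvIdx, ih]

-- ---- the grouping/decorating fold invariant ----
theorem pvInv (nd : PySem.Dict String Int) (es : List String)
    (d : PySem.Dict Int (List String)) (co seen : PySem.Dict Int Int)
    (keyed : List (Int × Int × String))
    (hnd : d.keys.Nodup)
    (hco : co.items = pvIdx d.keys 0)
    (hseen : ∀ c, seen.getD c 0 = ((d.getD c []).length : Int))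
    (hk : keyed.Perm (pvG d)) :
    (es.foldl (fun d e => d.modify (nd.getD e 0) [] (fun l => l ++ [e])) d).keys.Nodup
    ∧ (es.foldl (pvBStep nd) (co, seen, keyed)).1.items
        = pvIdx (es.foldl (fun d e => d.modify (nd.getD e 0) [] (fun l => l ++ [e])) d).keys 0
    ∧ (∀ c, (es.foldl (pvBStep nd) (co, seen, keyed)).2.1.getD c 0
        = (((es.foldl (fun d e => d.modify (nd.getD e 0) [] (fun l => l ++ [e])) d).getD c []).length : Int))
    ∧ (es.foldl (pvBStep nd) (co, seen, keyed)).2.2.Perm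
        (pvG (es.foldl (fun d e => d.modify (nd.getD e 0) [] (fun l => l ++ [e])) d)) := by
  induction es generalizing d co seen keyed with
  | nil => exact ⟨hnd, hco, hseen, hk⟩
  | cons e es ih =>
    simp only [List.foldl_cons]
    set c := nd.getD e 0 with hcdef
    have hcokeys : co.keys = d.keys := by
      show co.items.map (fun p => p.1) = d.keys
      rw [hco, pvIdx_map_fst]
    have hcosize : co.items.length = d.keys.length := by
      have := congrArg List.length (pvIdx_map_fst d.keys 0)
      rw [hco]
      simpa using this
    have hcontains : co.contains (c) = d.contains (c) := by
      have h1 := PySem.Dict.contains_iff_mem_keys co (c)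
      have h2 := PySem.Dict.contains_iff_mem_keys d (c)
      rw [hcokeys] at h1
      by_cases hm : c ∈ d.keys
      · rw [h1.mpr hm, h2.mpr hm]
      · cases hb : co.contains (c) with
        | false =>
          cases hb2 : d.contains (c) with
          | false => rfl
          | true => exact absurd (h2.mp hb2) hm
        | true => exact absurd (h1.mp hb) hm
    have hmod : d.modify (c) [] (fun l => l ++ [e])
        = d.insert (c) (d.getD (c) [] ++ [e]) := rfl
    by_cases hcon : d.contains (c) = true
    · -- the component is already present: one of its lists grows by e at the end
      obtain ⟨q, hqmem, hq1⟩ := List.mem_map.mp ((PySem.Dict.contains_iff_mem_keys d _).mp hcon)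
      obtain ⟨i1, i2, hsplit⟩ := List.append_of_mem hqmem
      obtain ⟨qc, ql⟩ := q
      have hq1' : qc = c := hq1
      rw [← hq1'] at hcon hcontains hmod ⊢
      have hl : d.getD qc [] = ql := PySem.Dict.getD_of_mem_items d hqmem hnd []
      have hkeys : d.keys = i1.map (fun p => p.1) ++ qc :: i2.map (fun p => p.1) := by
        show d.items.map (fun p => p.1) = _
        rw [hsplit]; simp
      have hnd' := hnd
      rw [hkeys] at hnd'
      have hni1 : ∀ p ∈ i1, p.1 ≠ qc := by
        intro p hp hpc
        have hm1 : qc ∈ i1.map (fun p => p.1) := List.mem_map.mpr ⟨p, hp, hpc⟩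
        have hdis := (List.nodup_append.mp hnd').2.2
        exact hdis _ hm1 _ (by simp) rfl
      have hni2 : ∀ p ∈ i2, p.1 ≠ qc := by
        intro p hp hpc
        have h3 := (List.nodup_append.mp hnd').2.1
        rw [List.nodup_cons] at h3
        exact h3.1 (List.mem_map.mpr ⟨p, hp, hpc⟩)
      -- items after the modify
      have hitems1 : (d.modify qc [] (fun l => l ++ [e])).items
          = i1 ++ (qc, ql ++ [e]) :: i2 := by
        rw [hmod, PySem.Dict.items_insert_of_contains d _ hcon, hl, hsplit]
        rw [List.map_append, List.map_cons]
        congr 1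
        · have h5 : i1.map (fun p => if (p.1 == qc) = true then (qc, ql ++ [e]) else p)
              = i1.map (fun p => p) := List.map_congr_left (fun p hp => by
            simp [show (p.1 == qc) = false from beq_eq_false_iff_ne.mpr (hni1 p hp)])
          simpa using h5
        · congr 1
          · simp
          · have h5 : i2.map (fun p => if (p.1 == qc) = true then (qc, ql ++ [e]) else p)
                = i2.map (fun p => p) := List.map_congr_left (fun p hp => by
              simp [show (p.1 == qc) = false from beq_eq_false_iff_ne.mpr (hni2 p hp)])
            simpa using h5
      have hkeys1 : (d.modify qc [] (fun l => l ++ [e])).keys = d.keys := by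
        show (d.modify qc [] (fun l => l ++ [e])).items.map (fun p => p.1)
            = d.items.map (fun p => p.1)
        rw [hitems1, hsplit]; simp
      -- the component index of qc
      have hjc : co.getD qc 0 = (i1.length : Int) := by
        have hmemco : (qc, (i1.length : Int)) ∈ co.items := by
          rw [hco, hkeys, pvIdx_append]
          simp [pvIdx]
        have hndco : co.keys.Nodup := by rw [hcokeys]; exact hnd
        exact PySem.Dict.getD_of_mem_items co hmemco hndco 0
      have hstep : pvBStep nd (co, seen, keyed) e
          = (co, seen.insert qc (seen.getD qc 0 + 1),
             keyed ++ [(seen.getD qc 0, (i1.length : Int), e)]) := by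
        simp only [pvBStep, ← hcdef, ← hq1', hcontains, hcon, if_pos, ite_true, hjc]
      rw [hstep]
      refine ih (d.modify qc [] (fun l => l ++ [e])) co _ _ ?_ ?_ ?_ ?_
      · rw [hkeys1]; exact hnd
      · rw [hco, hkeys1]
      · intro c'
        rw [show d.modify qc [] (fun l => l ++ [e]) = d.insert qc (d.getD qc [] ++ [e]) from rfl,
          PySem.Dict.getD_insert, PySem.Dict.getD_insert]
        by_cases hcc : c' = qc
        · simp [hcc, hseen qc, hl]
        · simp [hcc, hseen c']
      · -- the permutation with the new grid
        have hG : pvG (d.modify qc [] (fun l => l ++ [e]))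
            = (pvEn 0 i1).flatMap (fun p => pvCol 0 p.1 p.2.2)
              ++ ((pvCol 0 (i1.length : Int) ql ++ [(seen.getD qc 0, (i1.length : Int), e)])
                  ++ (pvEn ((i1.length : Int) + 1) i2).flatMap (fun p => pvCol 0 p.1 p.2.2)) := by
          rw [pvG, hitems1, pvEn_append, List.flatMap_append]
          congr 1
          rw [show pvEn ((0 : Int) + i1.length) ((qc, ql ++ [e]) :: i2)
              = ((0 : Int) + i1.length, (qc, ql ++ [e])) :: pvEn ((0 : Int) + i1.length + 1) i2 from rfl]
          rw [List.flatMap_cons]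
          simp only [zero_add]
          rw [pvCol_append]
          congr 2
          · rw [hseen qc, hl]
            simp
        have hGold : pvG d
            = (pvEn 0 i1).flatMap (fun p => pvCol 0 p.1 p.2.2)
              ++ (pvCol 0 (i1.length : Int) ql
                  ++ (pvEn ((i1.length : Int) + 1) i2).flatMap (fun p => pvCol 0 p.1 p.2.2)) := by
          rw [pvG, hsplit, pvEn_append, List.flatMap_append]
          congr 1
          rw [show pvEn ((0 : Int) + i1.length) ((qc, ql) :: i2)
              = ((0 : Int) + i1.length, (qc, ql)) :: pvEn ((0 : Int) + i1.length + 1) i2 from rfl]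
          rw [List.flatMap_cons]
          simp only [zero_add]
        rw [hG]
        refine ((hk.append_right [(seen.getD qc 0, (i1.length : Int), e)]).trans ?_)
        rw [hGold]
        simp only [List.append_assoc, List.cons_append, List.nil_append]
        refine List.Perm.append_left _ ?_
        refine List.Perm.append_left _ ?_
        exact List.perm_append_comm
    · -- a new component: a fresh one-element list is appended
      have hconf : d.contains (c) = false := by
        cases hb : d.contains (c)
        · rfl
        · exact absurd hb hcon
      have hgd : d.getD (c) [] = [] := PySem.Dict.getD_of_not_contains d [] hconf
      have hitems1 : (d.modify (c) [] (fun l => l ++ [e])).items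
          = d.items ++ [(c, [e])] := by
        rw [hmod, PySem.Dict.items_insert_of_not_contains d _ hconf, hgd]
        simp
      have hkeys1 : (d.modify (c) [] (fun l => l ++ [e])).keys
          = d.keys ++ [c] := by
        have h5 := congrArg (List.map (fun p : Int × List String => p.1)) hitems1
        simpa [PySem.Dict.keys] using h5
      have hnotmem : c ∉ d.keys := by
        intro hm
        rw [(PySem.Dict.contains_iff_mem_keys d _).mpr hm] at hconf
        exact Bool.true_eq_false.mp hconf
      have hcof : co.contains (c) = false := by rw [hcontains, hconf]
      have hitemsco : (co.insert (c) (co.size : Int)).items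
          = co.items ++ [(c, (co.size : Int))] :=
        PySem.Dict.items_insert_of_not_contains co _ hcof
      have hr0 : seen.getD (c) 0 = 0 := by rw [hseen, hgd]; rfl
      have hjc : (co.insert (c) (co.size : Int)).getD (c) 0
          = (co.size : Int) := PySem.Dict.getD_insert_self co _ _ _
      have hstep : pvBStep nd (co, seen, keyed) e
          = (co.insert (c) (co.size : Int), seen.insert (c) (0 + 1),
             keyed ++ [(0, (co.size : Int), e)]) := by
        simp only [pvBStep, ← hcdef, hcof, Bool.false_eq_true, if_neg, ite_false, hr0, hjc]
      rw [hstep]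
      refine ih (d.modify (c) [] (fun l => l ++ [e])) _ _ _ ?_ ?_ ?_ ?_
      · rw [hkeys1]
        refine List.nodup_append.mpr ⟨hnd, List.nodup_singleton _, ?_⟩
        intro a ha b hb
        rcases List.mem_singleton.mp hb with rfl
        exact fun h5 => hnotmem (h5 ▸ ha)
      · rw [hitemsco, hco, hkeys1, pvIdx_append]
        have h6 : co.size = d.keys.length := hcosize
        simp [pvIdx, h6]
      · intro c'
        rw [show d.modify (c) [] (fun l => l ++ [e])
            = d.insert (c) (d.getD (c) [] ++ [e]) from rfl,
          PySem.Dict.getD_insert, PySem.Dict.getD_insert]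
        by_cases hcc : c' = c
        · simp [hcc, hgd]
        · simp [hcc, hseen c']
      · have hG : pvG (d.modify (c) [] (fun l => l ++ [e]))
            = pvG d ++ [((0 : Int), (d.items.length : Int), e)] := by
          rw [pvG, pvG, hitems1, pvEn_append, List.flatMap_append]
          congr 1
          simp [pvEn, pvCol]
        rw [hG]
        have hsz : (co.size : Int) = (d.items.length : Int) := by
          show (co.items.length : Int) = _
          have : d.keys.length = d.items.length := by
            show (d.items.map (fun p => p.1)).length = d.items.length
            simp
          rw [hcosize, this]
        rw [hsz]
        exact hk.append_right _

theorem pvChunksA_eq_map (xs : List String) (bs : Int) :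
    pvChunksA xs bs =
      (PySem.List.pyRange 0 (xs.length : Int) bs).map
        (fun i => PySem.List.slice xs (some i) (some (i + bs))) := by
  unfold pvChunksA
  rw [show (fun (acc : List (List String)) i =>
        acc ++ [PySem.List.slice xs (some i) (some (i + bs))])
      = (fun acc i => acc ++ [(fun i => PySem.List.slice xs (some i) (some (i + bs))) i]) from rfl,
    PySem.List.foldl_append_singleton_eq_map]
  simp

theorem pvG_values (d : PySem.Dict Int (List String)) :
    (pvEn 0 d.values).flatMap (fun p => pvCol 0 p.1 p.2) = pvG d := by
  show (pvEn 0 (d.items.map (fun p => p.2))).flatMap (fun p => pvCol 0 p.1 p.2) = pvG d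
  rw [pvEn_map, List.flatMap_map, pvG]

-- ===== VERDICT (by name: the statement is the Claim_ definition above) =====
theorem stratify_batches_by_component_py_spec : Claim_equal_stratify_batches_by_component_py := by
  intro entities ntc bs nc _ _
  unfold Spec_stratify_batches_by_component_py
  unfold stratify_batches_by_component_py stratify_batches_by_component_py_alt
  by_cases hb : nc ≤ 1 ∨ ntc.isEmpty
  · simp only [hb, ite_true, if_pos]
    exact pvChunksA_eq_map entities bs
  · simp only [hb, ite_false, if_neg]
    obtain ⟨hndF, hcoF, hseenF, hkF⟩ :=
      pvInv (PySem.Dict.ofList ntc) entities PySem.Dict.empty PySem.Dict.empty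
        PySem.Dict.empty [] (by simp [PySem.Dict.keys_empty]) rfl
        (by intro c; simp [PySem.Dict.getD_empty]) (List.Perm.refl [])
    have hperm : (pvDR 0 (pvEn 0
        (entities.foldl (fun d e => d.modify ((PySem.Dict.ofList ntc).getD e 0) []
          (fun l => l ++ [e])) PySem.Dict.empty).values)).Perm
        (entities.foldl (pvBStep (PySem.Dict.ofList ntc))
          (PySem.Dict.empty, PySem.Dict.empty, [])).2.2 := by
      refine ((pvDR_perm 0 _).trans ?_).trans hkF.symm
      rw [pvG_values]
    have hpair := pvDR_pairwise 0 (pvEn 0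
        (entities.foldl (fun d e => d.modify ((PySem.Dict.ofList ntc).getD e 0) []
          (fun l => l ++ [e])) PySem.Dict.empty).values) (pvEn_fst_pairwise 0 _)
    have hsorted : PySem.List.sorted
        (entities.foldl (pvBStep (PySem.Dict.ofList ntc))
          (PySem.Dict.empty, PySem.Dict.empty, [])).2.2
        (fun t => toLex (t.1, t.2.1)) false
        = pvDR 0 (pvEn 0
            (entities.foldl (fun d e => d.modify ((PySem.Dict.ofList ntc).getD e 0) []
              (fun l => l ++ [e])) PySem.Dict.empty).values) :=
      PySem.List.sorted_eq_of_perm_of_pairwise_lt _ _ _ hperm hpair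
    have hA : pvALoop
        (entities.foldl (fun d e => d.modify ((PySem.Dict.ofList ntc).getD e 0) []
          (fun l => l ++ [e])) PySem.Dict.empty).values
        (List.replicate (entities.foldl (fun d e => d.modify ((PySem.Dict.ofList ntc).getD e 0) []
          (fun l => l ++ [e])) PySem.Dict.empty).values.length 0)
        = pvU (entities.foldl (fun d e => d.modify ((PySem.Dict.ofList ntc).getD e 0) []
          (fun l => l ++ [e])) PySem.Dict.empty).values := by
      rw [pvALoop_eq_U _ _ (by simp), pvZipWith_drop_zero]
    have hB : (PySem.List.sorted
        (entities.foldl (pvBStep (PySem.Dict.ofList ntc))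
          (PySem.Dict.empty, PySem.Dict.empty, [])).2.2
        (fun t => toLex (t.1, t.2.1)) false).map (fun t => t.2.2)
        = pvU (entities.foldl (fun d e => d.modify ((PySem.Dict.ofList ntc).getD e 0) []
          (fun l => l ++ [e])) PySem.Dict.empty).values := by
      rw [hsorted, pvDR_map_thd, pvEn_map_snd]
    rw [pvChunksA_eq_map, hA, ← hB]
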